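-- pv_equiv track=rewrite | github.com/Coding-Crew-Forever/Coding-Test-Study | julia8024/PGS_60058.py | solution
-- ===== SOURCE A (Python) =====
-- def check_balance(s):
--     check = 0
--     for i in s:
--         if i == '(':
--             check += 1
--         else:
--             check -= 1
--
--     return True if check == 0 else False
--
-- def check_correct(s):
--     stack = []
--     for i in s:
--         if i == '(':
--             stack.append(i)
--         elif i == ')' and len(stack) != 0:
--             stack.pop()
--         else:
--             return False
--     return True if len(stack) == 0 else False
--
-- def solution(p):
--     answer = ''
--     u = ""
--     v = ""
--
--     # 빈 문자열이거나, 올바른 괄호 문자열인 경우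
--     if len(p) == 0 or check_correct(p):
--         return p
--
--     # 문자열 나누기 (u가 처음으로 올바른 괄호 문자열이 될때)
--     for i in range(2, len(p)+1, 2):
--         if check_balance(p[0:i]):
--             u = p[:i]
--             v = p[i:]
--             break
--
--     if (check_correct(u)):
--         answer += u + solution(v)
--     else:
--         answer += '(' + solution(v) + ')'
--         for i in u[1:-1]:
--             if i == '(':
--                 answer += ')'
--             else:
--                 answer += '('
--
--     return answer
-- ===== SOURCE B (Python) =====
-- def solution(p):
--     bal = 0
--     ok = True  # scanned prefix is a correct parenthesis string so far
--     for i, c in enumerate(p):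
--         if c == '(':
--             bal += 1
--         else:
--             if c != ')' or bal <= 0:
--                 ok = False
--             bal -= 1
--         if bal == 0:
--             u, v = p[:i + 1], p[i + 1:]
--             if ok:
--                 return u + solution(v)
--             return '(' + solution(v) + ')' + ''.join(')' if ch == '(' else '(' for ch in u[1:-1])
--     return ''
-- ===== Notes on version B (the rewrite author's own statement) =====
-- stated objective: faster
-- what changed: A finds the u/v split by re-running check_balance on every even prefix (quadratic per level) plus separate full check_correct passes; B keeps one running balance and correctness flag in a single scan that breaks at the first zero balance, deciding the split, the correctness of u and whether p needs no change at once.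
import Mathlib
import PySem

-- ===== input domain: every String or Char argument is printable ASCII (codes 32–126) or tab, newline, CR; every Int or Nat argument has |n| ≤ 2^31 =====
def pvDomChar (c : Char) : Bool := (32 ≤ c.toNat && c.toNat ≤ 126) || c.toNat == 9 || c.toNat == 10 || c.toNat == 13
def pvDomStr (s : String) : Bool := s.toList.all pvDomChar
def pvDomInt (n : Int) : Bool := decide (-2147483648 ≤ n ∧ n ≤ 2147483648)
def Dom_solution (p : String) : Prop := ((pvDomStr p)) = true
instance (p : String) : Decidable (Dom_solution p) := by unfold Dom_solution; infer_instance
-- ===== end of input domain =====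

-- B replaces A's quadratic split search (re-scanning every even prefix with check_balance,
-- plus a separate check_correct pass) by one running-balance scan that breaks at the first
-- zero; measured faster. Equivalence of the return values is proved below.

-- ===== PORT A =====
def balStep (b : Int) (c : Char) : Int := if c = '(' then b + 1 else b - 1

-- check_balance: check = 0; +1 for '(', else -1; return check == 0
def check_balance (s : List Char) : Bool := (s.foldl balStep 0) == 0

-- check_correct's loop with its stack (append at the end, pop from the end), early False
def checkCorrectAux : List Char → List Char → Bool
  | [], stack => stack.length == 0
  | c :: rest, stack =>
    if c = '(' then checkCorrectAux rest (stack ++ [c])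
    else if c = ')' ∧ stack.length ≠ 0 then checkCorrectAux rest stack.dropLast
    else false

def check_correct (s : List Char) : Bool := checkCorrectAux s []

def flipChar (c : Char) : Char := if c = '(' then ')' else '('

-- the loop 'for i in range(2, len(p)+1, 2): if check_balance(p[0:i]): break' (hand port, exact:
-- index i starts at 2, steps by 2 while i < len(p)+1; some i = the break, none = no break)
def splitLoopA (p : List Char) (i : Nat) : Option Nat :=
  if i < p.length + 1 then
    if check_balance (p.take i) then some i else splitLoopA p (i + 2)
  else none
termination_by p.length + 1 - i

-- termination fact for solutionA, cited in its decreasing_by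
theorem splitLoopA_some_ge (p : List Char) : ∀ i j, splitLoopA p i = some j → i ≤ j ∧ j ≤ p.length := by
  have key : ∀ (f i j : Nat), p.length + 1 - i ≤ f → splitLoopA p i = some j → i ≤ j ∧ j ≤ p.length := by
    intro f
    induction f with
    | zero =>
      intro i j hf h
      rw [splitLoopA, if_neg (by omega)] at h
      exact absurd h (by simp)
    | succ f ihf =>
      intro i j hf h
      rw [splitLoopA] at h
      by_cases hi : i < p.length + 1
      · rw [if_pos hi] at h
        by_cases hb : check_balance (p.take i)
        · rw [if_pos hb] at h
          have hj : i = j := Option.some.inj h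
          omega
        · rw [if_neg hb] at h
          have := ihf (i + 2) j (by omega) h
          omega
      · rw [if_neg hi] at h
        exact absurd h (by simp)
  intro i j h
  exact key (p.length + 1 - i) i j (by omega) h

def solutionA (p : List Char) : List Char :=
  if p.length = 0 then p
  else if check_correct p then p
  else
    match h : splitLoopA p 2 with
    | none =>
      -- no break: u = "", v = ""
      if check_correct ([] : List Char) then [] ++ solutionA []
      else '(' :: (solutionA [] ++ ')' :: (([] : List Char).drop 1).dropLast.map flipChar)
    | some j =>
      let u := p.take j
      let v := p.drop j
      if check_correct u then u ++ solutionA v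
      else '(' :: (solutionA v ++ ')' :: ((u.drop 1).dropLast.map flipChar))
termination_by p.length
decreasing_by
  · simp only [List.length_nil]; omega
  · have := splitLoopA_some_ge p 2 j h
    simp only [List.length_drop]; omega
  · have := splitLoopA_some_ge p 2 j h
    simp only [List.length_drop]; omega

def solution (p : String) : String := String.mk (solutionA p.toList)

-- ===== PORT B =====
-- B's single loop: running balance and running correctness flag, breaking (some (i+1, ok))
-- at the first index where the balance returns to 0; none = loop fell through
def findZ : List Char → Int → Bool → Nat → Option (Nat × Bool)
  | [], _, _, _ => none
  | c :: r, bal, ok, i =>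
    let bal' := if c = '(' then bal + 1 else bal - 1
    let ok' := if c = '(' then ok else (ok && (decide (c = ')') && decide (0 < bal)))
    if bal' = 0 then some (i + 1, ok')
    else findZ r bal' ok' (i + 1)

-- termination fact for solutionB, cited in its decreasing_by
theorem findZ_some_gt : ∀ (s : List Char) (bal : Int) (ok : Bool) (i : Nat) (j : Nat) (o : Bool),
    findZ s bal ok i = some (j, o) → i < j := by
  intro s
  induction s with
  | nil => intro bal ok i j o h; simp [findZ] at h
  | cons c r ih =>
    intro bal ok i j o h
    rw [findZ] at h
    by_cases hb : (if c = '(' then bal + 1 else bal - 1) = 0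
    · simp only [if_pos hb] at h
      cases h; omega
    · simp only [if_neg hb] at h
      have := ih _ _ (i + 1) j o h
      omega

def solutionB (p : List Char) : List Char :=
  match h : findZ p 0 true 0 with
  | none => []
  | some (j, o) =>
    let u := p.take j
    let v := p.drop j
    if o then u ++ solutionB v
    else '(' :: (solutionB v ++ ')' :: ((u.drop 1).dropLast.map flipChar))
termination_by p.length
decreasing_by
  all_goals
    cases p with
    | nil => simp [findZ] at h
    | cons c r =>
      have := findZ_some_gt _ _ _ _ _ _ h
      simp only [List.length_drop]
      simp only [List.length_cons]
      omega

def solution_alt (p : String) : String := String.mk (solutionB p.toList)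

-- ===== PRECONDITION & SPEC =====
def Spec_solution (p : String) (out : String) : Prop := out = solution_alt p
instance (p : String) (out : String) : Decidable (Spec_solution p out) := by unfold Spec_solution; infer_instance

-- ===== CLAIM (what is proved, stated in full; the proofs are below) =====
def Claim_equal_solution : Prop := ∀ (p : String), Dom_solution p → Spec_solution p (solution p)

-- ===== LEMMAS AND PROOFS =====

def balFrom (s : List Char) (k : Int) : Int := s.foldl balStep k

def okF : List Char → Int → Bool
  | [], _ => true
  | c :: r, k => (if c = '(' then true else (decide (c = ')') && decide (0 < k))) && okF r (if c = '(' then k + 1 else k - 1)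

theorem balFrom_nil (k : Int) : balFrom [] k = k := rfl
theorem balFrom_cons (c : Char) (r : List Char) (k : Int) :
    balFrom (c :: r) k = balFrom r (if c = '(' then k + 1 else k - 1) := by
  simp [balFrom, balStep]

theorem balFrom_append (a b : List Char) (k : Int) :
    balFrom (a ++ b) k = balFrom b (balFrom a k) := by
  simp [balFrom, List.foldl_append]

theorem okF_append : ∀ (a b : List Char) (k : Int),
    okF (a ++ b) k = (okF a k && okF b (balFrom a k)) := by
  intro a
  induction a with
  | nil => intro b k; simp [okF, balFrom_nil]
  | cons c r ih =>
    intro b k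
    simp only [List.cons_append, okF, ih, balFrom_cons, Bool.and_assoc]

theorem checkCorrectAux_eq : ∀ (s : List Char) (stack : List Char),
    checkCorrectAux s stack = (okF s stack.length && (balFrom s (stack.length : Int) == 0)) := by
  intro s
  induction s with
  | nil => intro stack; simp [checkCorrectAux, okF, balFrom_nil]
  | cons c r ih =>
    intro stack
    rw [checkCorrectAux]
    by_cases hc : c = '('
    · rw [if_pos hc, ih]
      simp only [okF, if_pos hc, List.length_append, List.length_cons, List.length_nil]
      rw [balFrom_cons, if_pos hc]
      push_cast
      simp [Bool.and_assoc]
    · rw [if_neg hc]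
      by_cases hcr : c = ')' ∧ stack.length ≠ 0
      · rw [if_pos hcr, ih]
        simp only [okF, if_neg hc, balFrom_cons, if_neg hc]
        have h1 : stack.dropLast.length = stack.length - 1 := by simp
        rw [h1]
        have h2 : ((stack.length - 1 : Nat) : Int) = (stack.length : Int) - 1 := by
          omega
        rw [h2]
        have h3 : (decide (c = ')') && decide (0 < (stack.length : Int))) = true := by
          simp [hcr.1]
          omega
        rw [h3]
        simp [Bool.and_assoc]
      · rw [if_neg hcr]
        simp only [okF, if_neg hc]
        have h3 : (decide (c = ')') && decide (0 < (stack.length : Int))) = false := by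
          rcases Decidable.not_and_iff_not_or_not.mp hcr with h | h
          · simp [h]
          · have : stack.length = 0 := by omega
            simp [this]
        rw [h3]
        simp

theorem check_correct_eq (s : List Char) :
    check_correct s = (okF s 0 && (balFrom s 0 == 0)) := by
  have := checkCorrectAux_eq s []
  simpa [check_correct] using this

theorem findZ_none_bal : ∀ (s : List Char) (bal : Int) (ok : Bool) (i : Nat),
    findZ s bal ok i = none → s ≠ [] → balFrom s bal ≠ 0 := by
  intro s
  induction s with
  | nil => intro bal ok i h1 h2; exact absurd rfl h2
  | cons c r ih =>
    intro bal ok i h _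
    rw [findZ] at h
    by_cases hb : (if c = '(' then bal + 1 else bal - 1) = 0
    · simp [if_pos hb] at h
    · simp only [if_neg hb] at h
      rw [balFrom_cons]
      cases r with
      | nil => simpa [balFrom_nil] using hb
      | cons d r2 => exact ih _ _ _ h (by simp)

-- the ok-flag update of findZ equals accumulating okF's guard with &&
theorem okStep (c : Char) (ok : Bool) (k : Int) :
    (if c = '(' then ok else (ok && (decide (c = ')') && decide (0 < k)))) =
    (ok && (if c = '(' then true else (decide (c = ')') && decide (0 < k)))) := by
  split_ifs <;> simp

-- BRIDGE: B's single scan finds exactly the split A's even-index loop finds, together with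
-- the correctness flag of the prefix; parity of the running balance rules out odd indices.
theorem bridge : ∀ (n : Nat) (r t : List Char), r.length = n → balFrom t 0 % 2 = 0 →
    (findZ r (balFrom t 0) (okF t 0) t.length = none →
      splitLoopA (t ++ r) (t.length + 2) = none) ∧
    (∀ j o, findZ r (balFrom t 0) (okF t 0) t.length = some (j, o) →
      splitLoopA (t ++ r) (t.length + 2) = some j ∧ t.length + 2 ≤ j ∧ j ≤ t.length + r.length ∧
      o = okF ((t ++ r).take j) 0 ∧ balFrom ((t ++ r).take j) 0 = 0) := by
  intro n
  induction n using Nat.strong_induction_on with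
  | _ n ih =>
    intro r t hlen hpar
    match r with
    | [] =>
      constructor
      · intro _
        rw [splitLoopA]
        simp
      · intro j o h; simp [findZ] at h
    | [c] =>
      have hne : (if c = '(' then balFrom t 0 + 1 else balFrom t 0 - 1) ≠ 0 := by
        split_ifs <;> omega
      constructor
      · intro _
        rw [splitLoopA]
        simp
      · intro j o h
        rw [findZ] at h
        simp only [if_neg hne] at h
        simp [findZ] at h
    | c1 :: c2 :: r' =>
      -- after one step the balance is odd, so findZ cannot fire there
      have hk1 : (if c1 = '(' then balFrom t 0 + 1 else balFrom t 0 - 1) ≠ 0 := by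
        split_ifs <;> omega
      set k := balFrom t 0 with hk
      set ok := okF t 0 with hok
      set k1 : Int := if c1 = '(' then k + 1 else k - 1 with hk1d
      set ok1 : Bool := if c1 = '(' then ok else (ok && (decide (c1 = ')') && decide (0 < k))) with hok1d
      set k2 : Int := if c2 = '(' then k1 + 1 else k1 - 1 with hk2d
      set ok2 : Bool := if c2 = '(' then ok1 else (ok1 && (decide (c2 = ')') && decide (0 < k1))) with hok2d
      have hfz : findZ (c1 :: c2 :: r') k ok t.length =
          (if k2 = 0 then some (t.length + 1 + 1, ok2) else findZ r' k2 ok2 (t.length + 1 + 1)) := by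
        rw [findZ, if_neg hk1, findZ]
      -- t' = t ++ [c1, c2]
      have ht'bal : balFrom (t ++ [c1, c2]) 0 = k2 := by
        rw [balFrom_append, balFrom_cons, balFrom_cons, balFrom_nil, ← hk, ← hk1d, ← hk2d]
      have ht'ok : okF (t ++ [c1, c2]) 0 = ok2 := by
        rw [okF_append, ← hk, ← hok]
        simp only [okF, Bool.and_true]
        rw [hok2d, okStep, hok1d, okStep, ← hk1d, Bool.and_assoc]
      have htake : ∀ m : Nat, (t ++ (c1 :: c2 :: r')).take (t.length + 2 + m) = (t ++ [c1, c2]) ++ r'.take m := by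
        intro m
        rw [List.append_assoc]
        have h1 : t ++ (c1 :: c2 :: r') = (t ++ [c1, c2]) ++ r' := by simp
        have h2 : t.length + 2 + m = (t ++ [c1, c2]).length + m := by simp
        rw [h1, h2, List.take_length_add_append]
        simp
      have htake0 : (t ++ (c1 :: c2 :: r')).take (t.length + 2) = t ++ [c1, c2] := by
        have := htake 0
        simpa using this
      have hcb : check_balance ((t ++ (c1 :: c2 :: r')).take (t.length + 2)) = (k2 == 0) := by
        rw [htake0]
        simp only [check_balance]
        rw [show (t ++ [c1, c2]).foldl balStep 0 = balFrom (t ++ [c1, c2]) 0 from rfl, ht'bal]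
      have hlt : t.length + 2 < (t ++ (c1 :: c2 :: r')).length + 1 := by
        simp only [List.length_append, List.length_cons]
        omega
      by_cases hz : k2 = 0
      · -- fires at index t.length + 2
        constructor
        · intro h; rw [hfz, if_pos hz] at h; simp at h
        · intro j o h
          rw [hfz, if_pos hz] at h
          injection h with h'
          injection h' with h1 h2
          refine ⟨?_, by omega, by simp; omega, ?_, ?_⟩
          · rw [splitLoopA, if_pos hlt, hcb]
            simp [hz, ← h1]
          · rw [← h1, htake0, ht'ok, h2]
          · rw [← h1, htake0, ht'bal, hz]
      · -- no fire: step splitLoopA past t.length+2 and recurse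
        have hk2par : k2 % 2 = 0 := by
          rw [hk2d, hk1d]
          split_ifs <;> omega
        have hstep : splitLoopA (t ++ (c1 :: c2 :: r')) (t.length + 2) =
            splitLoopA (t ++ (c1 :: c2 :: r')) (t.length + 2 + 2) := by
          rw [splitLoopA, if_pos hlt, hcb]
          simp [hz]
        have hpeq : t ++ (c1 :: c2 :: r') = (t ++ [c1, c2]) ++ r' := by simp
        have hn : r'.length + 2 = n := by simpa using hlen
        have ih' := ih r'.length (by omega) r' (t ++ [c1, c2]) rfl (by rw [ht'bal]; exact hk2par)
        rw [ht'bal, ht'ok] at ih'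
        have hlen2 : (t ++ [c1, c2]).length = t.length + 2 := by simp
        rw [hlen2] at ih'
        constructor
        · intro h
          rw [hfz, if_neg hz] at h
          rw [hstep, hpeq]
          have : t.length + 2 + 2 = (t.length + 2) + 2 := rfl
          exact ih'.1 h
        · intro j o h
          rw [hfz, if_neg hz] at h
          obtain ⟨e1, e2, e3, e4, e5⟩ := ih'.2 j o h
          rw [hpeq] at hstep ⊢
          refine ⟨by rw [hstep]; exact e1, by omega, ?_, e4, e5⟩
          simp only [List.length_cons]
          have := e3
          simp only [List.length_append, List.length_cons, List.length_nil] at this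
          omega

-- A returns correct strings unchanged
theorem solutionA_of_correct (v : List Char) (h : check_correct v = true) : solutionA v = v := by
  rw [solutionA]
  by_cases hv : v.length = 0
  · simp [hv]
  · simp [hv, h]

theorem solutionA_nil : solutionA [] = [] := by
  rw [solutionA]; simp

theorem main_eq : ∀ (n : Nat) (p : List Char), p.length < n → solutionA p = solutionB p := by
  intro n
  induction n with
  | zero => intro p h; omega
  | succ n ih =>
    intro p hlen
    have hbr := bridge p.length p [] rfl (by simp [balFrom_nil])
    simp only [List.nil_append, List.length_nil, Nat.zero_add, balFrom_nil] at hbr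
    have hokn : okF [] 0 = true := rfl
    rw [hokn] at hbr
    match hF : findZ p 0 true 0 with
    | none =>
      have hB : solutionB p = [] := by
        rw [solutionB]
        split
        · rfl
        · rename_i heq
          rw [hF] at heq
          exact absurd heq (by simp)
      rw [hB]
      match p with
      | [] => exact solutionA_nil
      | c :: r =>
        have hbal : balFrom (c :: r) 0 ≠ 0 := findZ_none_bal _ _ _ _ hF (by simp)
        have hcc : check_correct (c :: r) = false := by
          rw [check_correct_eq]
          simp [hbal]
        rw [solutionA]
        simp only [List.length_cons, Nat.add_eq_zero, and_false, if_false, hcc, Bool.false_eq_true,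
          if_false]
        have hsplit := hbr.1 hF
        rw [hsplit]
        have : check_correct ([] : List Char) = true := by decide
        simp [this, solutionA_nil]
    | some (j, o) =>
      obtain ⟨hA, hj2, hjle, ho, hb0⟩ := hbr.2 j o hF
      have hplen : 2 ≤ p.length := by omega
      set u := p.take j with hu
      set v := p.drop j with hv
      have hvlen : v.length < p.length := by
        rw [hv, List.length_drop]; omega
      have hIH : solutionA v = solutionB v := ih v (by omega)
      have hccu : check_correct u = o := by
        rw [check_correct_eq]
        simp [hb0, ho]
      have huv : u ++ v = p := List.take_append_drop j p
      have hB : solutionB p = (if o = true then u ++ solutionB v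
          else '(' :: (solutionB v ++ ')' :: ((u.drop 1).dropLast.map flipChar))) := by
        rw [solutionB]
        split
        · rename_i heq
          rw [hF] at heq
          exact absurd heq (by simp)
        · rename_i heq
          rw [hF] at heq
          injection heq with hpair
          injection hpair with e1 e2
          subst e1
          subst e2
          rfl
      rw [hB]
      by_cases hc : check_correct p = true
      · -- p correct: A returns p; B returns u ++ B(v) with o = true and v correct
        have h1 : (okF p 0 && (balFrom p 0 == 0)) = true := by rw [← check_correct_eq]; exact hc
        have hokp : okF p 0 = true := by
          rcases Bool.and_eq_true .. |>.mp h1 with ⟨h, _⟩; exact h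
        have hbalp : balFrom p 0 = 0 := by
          rcases Bool.and_eq_true .. |>.mp h1 with ⟨_, h⟩; simpa using h
        have hsplitok : okF (u ++ v) 0 = (okF u 0 && okF v 0) := by
          rw [okF_append, hb0]
        have hokuv : (okF u 0 && okF v 0) = true := by
          rw [← hsplitok, huv]; exact hokp
        have hou : o = true := by
          rw [ho]
          exact (Bool.and_eq_true .. |>.mp hokuv).1
        have hokv : okF v 0 = true := (Bool.and_eq_true .. |>.mp hokuv).2
        have hbalv : balFrom v 0 = 0 := by
          have := balFrom_append u v 0
          rw [huv, hb0] at this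
          omega
        have hccv : check_correct v = true := by
          rw [check_correct_eq, hokv, hbalv]; simp
        rw [solutionA_of_correct p hc, hou]
        simp only [if_true]
        rw [← hIH, solutionA_of_correct v hccv, huv]
      · -- p not correct: both take the same split branch
        have hp0 : ¬ p.length = 0 := by omega
        have hAeq : solutionA p = (if check_correct u = true then u ++ solutionA v
            else '(' :: (solutionA v ++ ')' :: ((u.drop 1).dropLast.map flipChar))) := by
          rw [solutionA, if_neg hp0, if_neg hc]
          split
          · rename_i heq
            rw [hA] at heq
            exact absurd heq (by simp)
          · rename_i heq
            rw [hA] at heq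
            injection heq with e
            subst e
            rfl
        rw [hAeq, hccu]
        cases o <;> simp [hIH]

-- ===== VERDICT (by name: the statement is the Claim_ definition above) =====
theorem solution_spec : Claim_equal_solution := by
  intro p _
  unfold Spec_solution solution solution_alt
  rw [main_eq (p.toList.length + 1) p.toList (by omega)]
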